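-- pv_equiv track=rewrite | github.com/axean/tergite-backend | app/services/quantum_executor/utils/logger.py | clean_Q1ASM_program
-- ===== SOURCE A (Python) =====
-- def clean_Q1ASM_program(program_lines: list, /) -> set:
--     """Clean a single Q1ASM program given as lines of code in string format.
--     Returns a set of enumerated lines, where argument, function & comment
--     are separated by exactly two whitespaces.
--     """
--     # remove empty lines
--     program_lines = list(filter(lambda l: l.replace(" ", "") != "", program_lines))
--     # replace tabs with spaces
--     program_lines = list(map(lambda l: l.replace("\t", " " * 3), program_lines))
--     # removing both the leading and the trailing whitespace
--     program_lines = list(map(lambda l: str.strip(l), program_lines))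
--
--     program_set = set()
--     # add line enumeration
--     for line_idx, line in enumerate(program_lines):
--         # reduce whitespace
--         while line != (line := line.replace(" " * 3, " " * 2)):
--             continue
--
--         program_set.add((line_idx, line))
--
--     return program_set
-- ===== SOURCE B (Python) =====
-- def clean_Q1ASM_program(program_lines: list, /) -> set:
--     """Single fused pass: filter, expand tabs, strip, and cap each run of
--     spaces at two with one left-to-right character scan per line."""
--     program_set = set()
--     idx = 0
--     for l in program_lines:
--         if all(c == " " for c in l):
--             continue
--         s = l.replace("\t", "   ").strip()
--         buf = []
--         run = 0
--         for c in s: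
--             if c == " ":
--                 run += 1
--                 if run <= 2:
--                     buf.append(c)
--             else:
--                 run = 0
--                 buf.append(c)
--         program_set.add((idx, "".join(buf)))
--         idx += 1
--     return program_set
-- ===== Notes on version B (the rewrite author's own statement) =====
-- stated objective: alternative
-- what changed: Replaces the per-line while-loop of repeated global ' '->' ' replacements (re-scanning the line until a fixpoint) with a single left-to-right character scan that caps each run of spaces at two, and fuses the filter/expand/strip/enumerate passes into one loop with an index counter.
import Mathlib
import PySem

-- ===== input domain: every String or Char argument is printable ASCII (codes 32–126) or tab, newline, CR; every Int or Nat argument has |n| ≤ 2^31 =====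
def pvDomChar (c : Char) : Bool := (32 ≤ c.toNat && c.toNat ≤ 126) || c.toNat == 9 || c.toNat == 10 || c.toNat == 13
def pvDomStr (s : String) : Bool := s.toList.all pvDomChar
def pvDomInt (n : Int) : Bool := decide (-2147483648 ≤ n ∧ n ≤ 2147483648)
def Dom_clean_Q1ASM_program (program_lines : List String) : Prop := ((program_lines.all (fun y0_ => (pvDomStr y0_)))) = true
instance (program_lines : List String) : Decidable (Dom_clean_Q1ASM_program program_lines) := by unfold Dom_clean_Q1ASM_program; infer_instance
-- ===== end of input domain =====

-- B replaces A's per-line while-loop of repeated global "   "->"  " replacements by a single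
-- left-to-right scan capping each space run at two, fused with the filter/expand/strip/enumerate
-- passes into one loop with an index counter; return value only (neither side mutates input).

-- ===== PORT A =====

-- what ONE pass of line.replace("   ", "  ") computes, as a structural recursion
-- (proved equal to PySem.Chars.replace in pvReplace3_eq; needed for the while-loop's termination)
def pvCapRep : List Char → List Char
  | [] => []
  | [c] => [c]
  | [c, d] => [c, d]
  | c :: d :: e :: u =>
    if c = ' ' ∧ d = ' ' ∧ e = ' ' then ' ' :: ' ' :: pvCapRep u
    else c :: pvCapRep (d :: e :: u)

theorem pvCapRep_length_le (l : List Char) : (pvCapRep l).length ≤ l.length := by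
  fun_induction pvCapRep l with
  | case1 => rfl
  | case2 c => rfl
  | case3 c d => rfl
  | case4 c d e u h ih => simp only [List.length_cons]; omega
  | case5 c d e u h ih => simp only [List.length_cons] at *; omega

theorem pvCapRep_eq_or_lt (l : List Char) : pvCapRep l = l ∨ (pvCapRep l).length < l.length := by
  fun_induction pvCapRep l with
  | case1 => left; rfl
  | case2 c => left; rfl
  | case3 c d => left; rfl
  | case4 c d e u h ih =>
    right
    have := pvCapRep_length_le u
    simp only [List.length_cons]
    omega
  | case5 c d e u h ih =>
    rcases ih with ih | ih
    · left; rw [ih]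
    · right; simp only [List.length_cons] at *; omega

theorem pvGoEq (fuel : Nat) (l acc : List Char) (h : l.length ≤ fuel) :
    PySem.Chars.replace.go [' ', ' ', ' '] [' ', ' '] fuel l acc = acc.reverse ++ pvCapRep l := by
  induction fuel generalizing l acc with
  | zero =>
    have h' : l = [] := by rwa [← List.length_eq_zero_iff, ← Nat.le_zero]
    subst h'
    simp [PySem.Chars.replace.go, pvCapRep]
  | succ n ih =>
    match l with
    | [] => simp [PySem.Chars.replace.go, pvCapRep]
    | [c] =>
      simp at h
      simp only [PySem.Chars.replace.go]
      rw [show ([' ',' ',' '] : List Char).isPrefixOf [c] = false by simp [List.isPrefixOf]]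
      simp only [Bool.false_eq_true, if_false]
      rw [ih [] (c :: acc) (by simp)]
      simp [pvCapRep]
    | [c, d] =>
      simp at h
      simp only [PySem.Chars.replace.go]
      rw [show ([' ',' ',' '] : List Char).isPrefixOf [c, d] = false by simp [List.isPrefixOf]]
      simp only [Bool.false_eq_true, if_false]
      rw [ih [d] (c :: acc) (by simp; omega)]
      simp [pvCapRep]
    | c :: d :: e :: u =>
      simp at h
      by_cases h3 : c = ' ' ∧ d = ' ' ∧ e = ' '
      · obtain ⟨rfl, rfl, rfl⟩ := h3
        simp only [PySem.Chars.replace.go]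
        rw [show ([' ',' ',' '] : List Char).isPrefixOf (' '::' '::' '::u) = true by
          simp [List.isPrefixOf]]
        rw [show List.drop ([' ',' ',' '] : List Char).length (' '::' '::' '::u) = u by rfl]
        rw [ih u ((([' ',' '] : List Char)).reverse ++ acc) (by omega)]
        simp [pvCapRep]
      · simp only [PySem.Chars.replace.go]
        rw [show ([' ',' ',' '] : List Char).isPrefixOf (c::d::e::u) = false by
          simp [List.isPrefixOf]; intro rfl1 rfl2 rfl3; exact h3 ⟨rfl1.symm, rfl2.symm, rfl3.symm⟩]
        simp only [Bool.false_eq_true, if_false]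
        rw [ih (d::e::u) (c :: acc) (by simp; omega)]
        simp only [pvCapRep, if_neg h3]
        simp

theorem pvReplace3_eq (s : String) :
    PySem.Str.replace s "   " "  " = String.ofList (pvCapRep s.toList) := by
  have h1 : ("   " : String).toList = [' ', ' ', ' '] := by decide
  have h2 : ("  " : String).toList = [' ', ' '] := by decide
  simp only [PySem.Str.replace, PySem.Chars.replace, h1, h2]
  simp only [List.isEmpty_cons, Bool.false_eq_true, if_false]
  rw [pvGoEq s.toList.length s.toList [] le_rfl]
  simp

-- the Python loop: while line != (line := line.replace("   ", "  ")): continue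
def pvReduceWs (line : String) : String :=
  let l' := PySem.Str.replace line "   " "  "
  if l' = line then line else pvReduceWs l'
termination_by line.toList.length
decreasing_by
  rename_i hne
  have hne' : PySem.Str.replace line "   " "  " ≠ line := hne
  rw [pvReplace3_eq] at hne' ⊢
  rcases pvCapRep_eq_or_lt line.toList with h | h
  · exact absurd (by rw [h, String.ofList_toList]) hne'
  · simpa using h

def clean_Q1ASM_program (program_lines : List String) : List (Int × String) :=
  let pl1 := program_lines.filter (fun l => PySem.Str.replace l " " "" != "")
  let pl2 := pl1.map (fun l => PySem.Str.replace l "\t" "   ")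
  let pl3 := pl2.map (fun l => PySem.Str.strip l)
  (PySem.List.enumerate pl3 0).foldl
    (fun ps p => PySem.Set.add ps (p.1, pvReduceWs p.2)) PySem.Set.empty

-- ===== PORT B =====

-- one step of B's character scan: run counter, a space is emitted only while the run is ≤ 2
def pvCollapseStep (bs : List Char × Nat) (c : Char) : List Char × Nat :=
  if c == ' ' then
    if bs.2 + 1 ≤ 2 then (bs.1 ++ [c], bs.2 + 1) else (bs.1, bs.2 + 1)
  else (bs.1 ++ [c], 0)

def clean_Q1ASM_program_alt (program_lines : List String) : List (Int × String) :=
  (program_lines.foldl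
    (fun (st : List (Int × String) × Int) l =>
      if l.toList.all (fun c => c == ' ') then st
      else
        let s := PySem.Str.strip (PySem.Str.replace l "\t" "   ")
        let r := s.toList.foldl pvCollapseStep ([], 0)
        (PySem.Set.add st.1 (st.2, String.ofList r.1), st.2 + 1))
    (PySem.Set.empty, 0)).1

-- ===== PRECONDITION & SPEC =====
def Spec_clean_Q1ASM_program (program_lines : List String) (out : List (Int × String)) : Prop := out = clean_Q1ASM_program_alt program_lines
instance (program_lines : List String) (out : List (Int × String)) : Decidable (Spec_clean_Q1ASM_program program_lines out) := by unfold Spec_clean_Q1ASM_program; infer_instance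

-- ===== CLAIM (what is proved, stated in full; the proofs are below) =====
def Claim_equal_clean_Q1ASM_program : Prop := ∀ (program_lines : List String), Dom_clean_Q1ASM_program program_lines → Spec_clean_Q1ASM_program program_lines (clean_Q1ASM_program program_lines)

-- ===== LEMMAS AND PROOFS =====

-- B's scan as a recursion on the character list
def pvCol : Nat → List Char → List Char
  | _, [] => []
  | run, c :: t =>
    if c = ' ' then (if run + 1 ≤ 2 then ' ' :: pvCol (run + 1) t else pvCol (run + 1) t)
    else c :: pvCol 0 t


theorem pvCol_space (r : Nat) (x : List Char) :
    pvCol r (' ' :: x) = if r + 1 ≤ 2 then ' ' :: pvCol (r + 1) x else pvCol (r + 1) x := by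
  rw [show pvCol r (' ' :: x) =
      (if (' ' : Char) = ' ' then (if r + 1 ≤ 2 then ' ' :: pvCol (r + 1) x else pvCol (r + 1) x)
       else ' ' :: pvCol 0 x) from rfl, if_pos rfl]

theorem pvCol_nonspace {c : Char} (hc : c ≠ ' ') (r : Nat) (x : List Char) :
    pvCol r (c :: x) = c :: pvCol 0 x := by
  rw [show pvCol r (c :: x) =
      (if c = ' ' then (if r + 1 ≤ 2 then ' ' :: pvCol (r + 1) x else pvCol (r + 1) x)
       else c :: pvCol 0 x) from rfl, if_neg hc]

theorem pvFoldl_collapse (l : List Char) (acc : List Char) (run : Nat) :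
    (l.foldl pvCollapseStep (acc, run)).1 = acc ++ pvCol run l := by
  induction l generalizing acc run with
  | nil => simp [pvCol]
  | cons c t ih =>
    by_cases hc : c = ' '
    · subst hc
      by_cases hr : run + 1 ≤ 2
      · simp [pvCollapseStep, pvCol, hr, ih]
      · simp [pvCollapseStep, pvCol, hr, ih]
    · simp [pvCollapseStep, pvCol, hc, ih]

theorem pvCol_ge2 (l : List Char) (r : Nat) (h : 2 ≤ r) : pvCol r l = pvCol 2 l := by
  induction l generalizing r with
  | nil => rfl
  | cons c t ih =>
    by_cases hc : c = ' '
    · subst hc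
      simp only [pvCol, if_neg (by omega : ¬ r + 1 ≤ 2), if_neg (by omega : ¬ 2 + 1 ≤ 2)]
      rw [ih (r + 1) (by omega), ih 3 (by omega)]
    · simp [pvCol, hc]

theorem pvCapRep_cons_tail {c : Char} {t : List Char} (h : pvCapRep (c :: t) = c :: t) :
    pvCapRep t = t := by
  match t with
  | [] => rfl
  | [d] => rfl
  | d :: e :: u =>
    by_cases h3 : c = ' ' ∧ d = ' ' ∧ e = ' '
    · exfalso
      rw [show pvCapRep (c :: d :: e :: u) = ' ' :: ' ' :: pvCapRep u by rw [pvCapRep, if_pos h3]] at h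
      have h1 := congrArg List.length h
      have h2 := pvCapRep_length_le u
      simp at h1
      omega
    · rw [show pvCapRep (c :: d :: e :: u) = c :: pvCapRep (d :: e :: u) by
        rw [pvCapRep, if_neg h3]] at h
      exact (List.cons.injEq _ _ _ _ ▸ h).2

theorem pvCol_fix_aux : ∀ (n : Nat) (l : List Char), l.length ≤ n →
    (pvCapRep l = l → pvCol 0 l = l) ∧
    (pvCapRep (' ' :: l) = ' ' :: l → pvCol 1 l = l) ∧
    (pvCapRep (' ' :: ' ' :: l) = ' ' :: ' ' :: l → pvCol 2 l = l) := by
  intro n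
  induction n with
  | zero =>
    intro l hl
    have h' : l = [] := by rwa [← List.length_eq_zero_iff, ← Nat.le_zero]
    subst h'
    exact ⟨fun _ => rfl, fun _ => rfl, fun _ => rfl⟩
  | succ n ih =>
    intro l hl
    match l with
    | [] => exact ⟨fun _ => rfl, fun _ => rfl, fun _ => rfl⟩
    | c :: t =>
      simp only [List.length_cons] at hl
      have iht := ih t (by omega)
      refine ⟨?_, ?_, ?_⟩
      · intro h
        by_cases hc : c = ' '
        · subst hc
          simp only [pvCol, if_pos (by omega : 0 + 1 ≤ 2)]
          rw [iht.2.1 h]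
          simp
        · simp only [pvCol, if_neg hc]
          rw [iht.1 (pvCapRep_cons_tail h)]
      · intro h
        by_cases hc : c = ' '
        · subst hc
          simp only [pvCol, if_pos (by omega : 1 + 1 ≤ 2)]
          rw [iht.2.2 h]
          simp
        · simp only [pvCol, if_neg hc]
          rw [iht.1 (pvCapRep_cons_tail (pvCapRep_cons_tail h))]
      · intro h
        by_cases hc : c = ' '
        · exfalso
          subst hc
          rw [show pvCapRep (' ' :: ' ' :: ' ' :: t) = ' ' :: ' ' :: pvCapRep t by
            rw [pvCapRep, if_pos ⟨rfl, rfl, rfl⟩]] at h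
          have h1 := congrArg List.length h
          have h2 := pvCapRep_length_le t
          simp at h1
          omega
        · simp only [pvCol, if_neg hc]
          have h' : pvCapRep (' ' :: ' ' :: c :: t) = ' ' :: pvCapRep (' ' :: c :: t) := by
            rw [pvCapRep, if_neg (by tauto)]
          rw [h'] at h
          have h'' := (List.cons.injEq _ _ _ _ ▸ h).2
          rw [iht.1 (pvCapRep_cons_tail (pvCapRep_cons_tail h''))]

theorem pvCol_capRep_aux : ∀ (n : Nat) (l : List Char), l.length ≤ n → ∀ run,
    pvCol run (pvCapRep l) = pvCol run l := by
  intro n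
  induction n with
  | zero =>
    intro l hl run
    have h' : l = [] := by rwa [← List.length_eq_zero_iff, ← Nat.le_zero]
    subst h'; rfl
  | succ n ih =>
    intro l hl run
    match l with
    | [] => rfl
    | [c] => rfl
    | [c, d] => rfl
    | c :: d :: e :: u =>
      simp only [List.length_cons] at hl
      by_cases h3 : c = ' ' ∧ d = ' ' ∧ e = ' '
      · obtain ⟨rfl, rfl, rfl⟩ := h3
        rw [show pvCapRep (' ' :: ' ' :: ' ' :: u) = ' ' :: ' ' :: pvCapRep u by
          rw [pvCapRep, if_pos ⟨rfl, rfl, rfl⟩]]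
        have ihu := ih u (by omega)
        match run with
        | 0 =>
          have L : pvCol 0 (' ' :: ' ' :: pvCapRep u) = ' ' :: ' ' :: pvCol 2 (pvCapRep u) := by
            rw [pvCol_space, if_pos (by omega), pvCol_space, if_pos (by omega)]
          have R : pvCol 0 (' ' :: ' ' :: ' ' :: u) = ' ' :: ' ' :: pvCol 3 u := by
            rw [pvCol_space, if_pos (by omega), pvCol_space, if_pos (by omega),
              pvCol_space, if_neg (by omega)]
          rw [L, R, ihu 2, pvCol_ge2 u 3 (by omega)]
        | 1 =>
          have L : pvCol 1 (' ' :: ' ' :: pvCapRep u) = ' ' :: pvCol 3 (pvCapRep u) := by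
            rw [pvCol_space, if_pos (by omega), pvCol_space, if_neg (by omega)]
          have R : pvCol 1 (' ' :: ' ' :: ' ' :: u) = ' ' :: pvCol 4 u := by
            rw [pvCol_space, if_pos (by omega), pvCol_space, if_neg (by omega),
              pvCol_space, if_neg (by omega)]
          rw [L, R, pvCol_ge2 (pvCapRep u) 3 (by omega), ihu 2, pvCol_ge2 u 4 (by omega)]
        | (r + 2) =>
          have L : pvCol (r + 2) (' ' :: ' ' :: pvCapRep u) = pvCol (r + 4) (pvCapRep u) := by
            rw [pvCol_space, if_neg (by omega), pvCol_space, if_neg (by omega)]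
          have R : pvCol (r + 2) (' ' :: ' ' :: ' ' :: u) = pvCol (r + 5) u := by
            rw [pvCol_space, if_neg (by omega), pvCol_space, if_neg (by omega),
              pvCol_space, if_neg (by omega)]
          rw [L, R, pvCol_ge2 (pvCapRep u) (r + 4) (by omega), ihu 2,
            pvCol_ge2 u (r + 5) (by omega)]
      · rw [show pvCapRep (c :: d :: e :: u) = c :: pvCapRep (d :: e :: u) by
          rw [pvCapRep, if_neg h3]]
        have ihd := ih (d :: e :: u) (by simp; omega)
        by_cases hc : c = ' '
        · subst hc
          simp only [pvCol_space, ihd (run + 1)]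
        · simp only [pvCol_nonspace hc, ihd 0]

theorem pvReduceWs_eq_col_aux : ∀ (n : Nat) (s : String), s.toList.length < n →
    pvReduceWs s = String.ofList (pvCol 0 s.toList) := by
  intro n
  induction n with
  | zero => intro s hs; omega
  | succ n ih =>
    intro s hs
    rw [pvReduceWs.eq_def]
    simp only [pvReplace3_eq]
    by_cases h : pvCapRep s.toList = s.toList
    · rw [if_pos (by rw [h, String.ofList_toList])]
      rw [(pvCol_fix_aux s.toList.length s.toList le_rfl).1 h, String.ofList_toList]
    · rw [if_neg (fun heq => h (by simpa [String.toList_ofList] using congrArg String.toList heq))]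
      have hlt := (pvCapRep_eq_or_lt s.toList).resolve_left h
      rw [ih (String.ofList (pvCapRep s.toList)) (by simpa [String.toList_ofList] using by omega)]
      rw [String.toList_ofList, pvCol_capRep_aux s.toList.length s.toList le_rfl 0]

theorem pvReduceWs_eq_col (s : String) :
    pvReduceWs s = String.ofList (pvCol 0 s.toList) :=
  pvReduceWs_eq_col_aux (s.toList.length + 1) s (by omega)

-- A's filter condition computed: l.replace(" ", "") removes exactly the spaces
theorem pvGoFilter (fuel : Nat) (l acc : List Char) (h : l.length ≤ fuel) :
    PySem.Chars.replace.go [' '] [] fuel l acc = acc.reverse ++ l.filter (fun c => !(c == ' ')) := by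
  induction fuel generalizing l acc with
  | zero =>
    have h' : l = [] := by rwa [← List.length_eq_zero_iff, ← Nat.le_zero]
    subst h'
    simp [PySem.Chars.replace.go]
  | succ n ih =>
    match l with
    | [] => simp [PySem.Chars.replace.go]
    | c :: t =>
      simp at h
      simp only [PySem.Chars.replace.go]
      by_cases hc : c = ' '
      · subst hc
        rw [show ([' '] : List Char).isPrefixOf (' ' :: t) = true by simp [List.isPrefixOf]]
        rw [show List.drop ([' '] : List Char).length (' ' :: t) = t by rfl]
        rw [ih t ([].reverse ++ acc) (by omega)]
        simp
      · rw [show ([' '] : List Char).isPrefixOf (c :: t) = false by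
          simp [List.isPrefixOf]; exact fun h => absurd h.symm hc]
        simp only [Bool.false_eq_true, if_false]
        rw [ih t (c :: acc) (by omega)]
        simp [hc]

theorem pvFilterCond (l : String) :
    (PySem.Str.replace l " " "" != "") = !(l.toList.all (fun c => c == ' ')) := by
  have h1 : (" " : String).toList = [' '] := by decide
  have h2 : ("" : String).toList = ([] : List Char) := by decide
  simp only [PySem.Str.replace, PySem.Chars.replace, h1, h2]
  simp only [List.isEmpty_cons, Bool.false_eq_true, if_false]
  rw [pvGoFilter l.toList.length l.toList [] le_rfl]
  simp only [List.reverse_nil, List.nil_append]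
  rcases h : l.toList.all (fun c => c == ' ') with _ | _
  · rw [List.all_eq_false] at h
    obtain ⟨c, hc, hcne⟩ := h
    simp only [Bool.not_false, bne_iff_ne, ne_eq]
    intro hcon
    have : List.filter (fun c => !(c == ' ')) l.toList = [] := by
      have := congrArg String.toList hcon
      simpa [String.toList_ofList, h2] using this
    rw [List.filter_eq_nil_iff] at this
    exact absurd (this c hc) (by simpa using hcne)
  · rw [List.all_eq_true] at h
    have hf : List.filter (fun c => !(c == ' ')) l.toList = [] :=
      List.filter_eq_nil_iff.mpr (fun c hc => by simpa using h c hc)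
    rw [hf]
    simp [show String.ofList [] = "" from rfl]

theorem pvMainLoop (lines : List String) (ps : List (Int × String)) (k : Int) :
    (PySem.List.enumerate ((lines.filter (fun l => PySem.Str.replace l " " "" != "")).map
        (fun l => PySem.Str.strip (PySem.Str.replace l "\t" "   "))) k).foldl
      (fun ps p => PySem.Set.add ps (p.1, pvReduceWs p.2)) ps
    = (lines.foldl
        (fun (st : List (Int × String) × Int) l =>
          if l.toList.all (fun c => c == ' ') then st
          else
            let s := PySem.Str.strip (PySem.Str.replace l "\t" "   ")
            let r := s.toList.foldl pvCollapseStep ([], 0)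
            (PySem.Set.add st.1 (st.2, String.ofList r.1), st.2 + 1))
        (ps, k)).1 := by
  induction lines generalizing ps k with
  | nil => simp
  | cons l t ih =>
    by_cases hl : l.toList.all (fun c => c == ' ')
    · have hf : (PySem.Str.replace l " " "" != "") = false := by
        rw [pvFilterCond, hl]; rfl
      simp only [List.foldl_cons, List.filter_cons, hf, Bool.false_eq_true, if_false, if_pos hl]
      exact ih ps k
    · have hf : (PySem.Str.replace l " " "" != "") = true := by
        rw [pvFilterCond]; simp [hl]
      rw [List.filter_cons, hf, if_pos rfl]
      simp only [List.map_cons, PySem.List.enumerate_cons, List.foldl_cons, if_neg hl]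
      rw [pvFoldl_collapse _ [] 0, List.nil_append, pvReduceWs_eq_col]
      exact ih _ (k + 1)

-- ===== VERDICT (by name: the statement is the Claim_ definition above) =====
theorem clean_Q1ASM_program_spec : Claim_equal_clean_Q1ASM_program := by
  intro program_lines _
  unfold Spec_clean_Q1ASM_program clean_Q1ASM_program clean_Q1ASM_program_alt
  simp only [List.map_map]
  exact pvMainLoop program_lines [] 0
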